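-- pv_equiv track=rewrite | github.com/sp9028/P1 | Predavanja 12 Specops/Specops.py | animacija0
-- ===== SOURCE A (Python) =====
-- def koraki(x, y, pot):
--     seznam = []
--     seznam.append((x,y))
--     for i in pot:
--         if i == '>':
--             x += 1
--             seznam.append((x, y))
--         elif i == '^':
--             y -= 1
--             seznam.append((x, y))
--         elif i == 'v':
--             y += 1
--             seznam.append((x, y))
--         elif i == '<':
--             x -= 1
--             seznam.append((x, y))
--     return seznam
--
-- def znak(m):
--
--     if len(m) == 0:
--         rez = '.'
--     elif len(m) == 1:
--         for e in m:
--             rez = e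
--     else:
--         st = len(m)
--         rez = str(st)
--
--     return rez
--
-- def izris(polozaj):
--     vse = ""
--     for i in polozaj:
--         for k in i:
--             vse += znak(k)
--         vse = vse + '\n'
--     return vse.strip()
--
-- def animacija0(x, y, pot, sirina, visina):
--     specialci = koraki(x,y,pot)
--     n = 0
--     vsi = []
--     for j in range(len(specialci)):
--         seznam = []
--         for i in range(visina):
--             seznam1 = []
--             seznam.append(seznam1)
--             for k in range(sirina):
--                 seznam1.append(set())
--
--         while n < len(specialci):
--             x,y = specialci[n]
--             seznam[y][x].add('A')
--             n += 1
--             break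
--         vsi.append(izris(seznam))
--     return vsi
-- ===== SOURCE B (Python) =====
-- def animacija0(x, y, pot, sirina, visina):
--     moves = {'>': (1, 0), '^': (0, -1), 'v': (0, 1), '<': (-1, 0)}
--     positions = [(x, y)]
--     for c in pot:
--         if c in moves:
--             dx, dy = moves[c]
--             x += dx
--             y += dy
--             positions.append((x, y))
--     grid = [['.'] * sirina for _ in range(visina)]
--     frames = []
--     for px, py in positions:
--         grid[py][px] = 'A'
--         frames.append('\n'.join(''.join(row) for row in grid).strip())
--         grid[py][px] = '.'
--     return frames
-- ===== Notes on version B (the rewrite author's own statement) =====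
-- stated objective: simpler
-- what changed: B allocates one visina×sirina character grid once and, per path position, marks it, renders it with '\n'.join and restores it, instead of A's rebuilding a grid of sets every frame, tracking a global counter n through a while/break, and mapping cells through the znak set-to-string helper.
import Mathlib
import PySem

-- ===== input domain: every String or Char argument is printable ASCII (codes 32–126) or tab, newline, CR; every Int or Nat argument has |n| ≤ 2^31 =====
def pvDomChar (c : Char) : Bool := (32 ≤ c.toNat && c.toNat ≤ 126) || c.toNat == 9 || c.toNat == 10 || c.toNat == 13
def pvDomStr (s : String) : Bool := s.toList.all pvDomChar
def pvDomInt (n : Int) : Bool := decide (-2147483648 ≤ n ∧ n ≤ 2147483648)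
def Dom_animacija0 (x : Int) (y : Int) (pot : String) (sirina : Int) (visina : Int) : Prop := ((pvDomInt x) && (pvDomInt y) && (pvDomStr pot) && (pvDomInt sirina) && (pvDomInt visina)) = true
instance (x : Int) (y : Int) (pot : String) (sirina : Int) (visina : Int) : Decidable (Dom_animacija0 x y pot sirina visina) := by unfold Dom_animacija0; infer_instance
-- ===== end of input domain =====

-- B reuses a single visina×sirina character buffer (mark, render, restore) instead of rebuilding a
-- grid-of-sets plus a znak pass for every frame; objective: simpler. Equivalence is about return values.


-- ===== PORT A =====
-- koraki's loop body (the Python for-loop over pot with state (seznam, x, y))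
def korakiBodyA (st : List (Int × Int) × Int × Int) (i : Char) : List (Int × Int) × Int × Int :=
  if i = '>' then (st.1 ++ [(st.2.1 + 1, st.2.2)], st.2.1 + 1, st.2.2)
  else if i = '^' then (st.1 ++ [(st.2.1, st.2.2 - 1)], st.2.1, st.2.2 - 1)
  else if i = 'v' then (st.1 ++ [(st.2.1, st.2.2 + 1)], st.2.1, st.2.2 + 1)
  else if i = '<' then (st.1 ++ [(st.2.1 - 1, st.2.2)], st.2.1 - 1, st.2.2)
  else st

def korakiA (x : Int) (y : Int) (pot : String) : List (Int × Int) :=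
  (pot.toList.foldl korakiBodyA ([(x, y)], x, y)).1

-- znak: cells are Python sets of strings; Python's rez is unassigned before the one-iteration loop,
-- the [] seed is never the result (the loop runs exactly once when len(m) == 1)
def znakA (m : PySem.Set (List Char)) : List Char :=
  if PySem.Set.len m = 0 then ['.']
  else if PySem.Set.len m = 1 then m.foldl (fun _ e => e) []
  else PySem.Int.toChars (PySem.Set.len m)

def izrisA (polozaj : List (List (PySem.Set (List Char)))) : List Char :=
  PySem.Chars.strip (polozaj.foldl (fun vse i => (i.foldl (fun v k => v ++ znakA k) vse) ++ ['\n']) [])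

-- the two nested range-loops building the fresh grid of empty sets
def emptyGridA (sirina : Int) (visina : Int) : List (List (PySem.Set (List Char))) :=
  (PySem.List.pyRange 0 visina 1).foldl (fun sez _i =>
    sez ++ [(PySem.List.pyRange 0 sirina 1).foldl
      (fun s1 _k => s1 ++ [(PySem.Set.empty : PySem.Set (List Char))]) []]) []

-- body of the outer 'for j in range(len(specialci))' loop, state (n, vsi); j itself is unused in Python
-- (the rebinding 'x,y = specialci[n]' is dead after the loop and is not part of the state)
def frameBodyA (specialci : List (Int × Int)) (sirina : Int) (visina : Int)
    (st : Int × List String) (_j : Int) : Int × List String :=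
  let seznam := emptyGridA sirina visina
  if st.1 < (specialci.length : Int) then
    let p := PySem.List.pyGetD specialci st.1 (0, 0)
    let row := PySem.List.pyGetD seznam p.2 []
    let cell := PySem.List.pyGetD row p.1 PySem.Set.empty
    (st.1 + 1, st.2 ++ [String.ofList (izrisA
      (PySem.List.pySetD seznam p.2 (PySem.List.pySetD row p.1 (PySem.Set.add cell ['A']))))])
  else (st.1, st.2 ++ [String.ofList (izrisA seznam)])

def animacija0 (x : Int) (y : Int) (pot : String) (sirina : Int) (visina : Int) : List String :=
  let specialci := korakiA x y pot
  ((PySem.List.pyRange 0 (specialci.length : Int) 1).foldl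
    (frameBodyA specialci sirina visina) (0, [])).2

-- ===== PORT B =====
def movesB : PySem.Dict Char (Int × Int) := PySem.Dict.mk [('>', (1, 0)), ('^', (0, -1)), ('v', (0, 1)), ('<', (-1, 0))]

def posBodyB (st : List (Int × Int) × Int × Int) (c : Char) : List (Int × Int) × Int × Int :=
  match PySem.Dict.get? movesB c with
  | some d => (st.1 ++ [(st.2.1 + d.1, st.2.2 + d.2)], st.2.1 + d.1, st.2.2 + d.2)
  | none => st

-- one iteration of B's frame loop: mark, render, restore (the in-place mutation of the shared buffer)
def markBodyB (st : List (List Char) × List String) (p : Int × Int) : List (List Char) × List String :=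
  let grid1 := PySem.List.pySetD st.1 p.2 (PySem.List.pySetD (PySem.List.pyGetD st.1 p.2 []) p.1 'A')
  let frame := String.ofList (PySem.Chars.strip (PySem.Chars.join ['\n'] grid1))
  let grid2 := PySem.List.pySetD grid1 p.2 (PySem.List.pySetD (PySem.List.pyGetD grid1 p.2 []) p.1 '.')
  (grid2, st.2 ++ [frame])

def animacija0_alt (x : Int) (y : Int) (pot : String) (sirina : Int) (visina : Int) : List String :=
  let positions := (pot.toList.foldl posBodyB ([(x, y)], x, y)).1
  let grid0 : List (List Char) := List.replicate visina.toNat (List.replicate sirina.toNat '.')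
  (positions.foldl markBodyB (grid0, [])).2

-- ===== PRECONDITION & SPEC =====
def pvArrow (c : Char) : Bool := c = '>' || c = '^' || c = 'v' || c = '<'

def pvStep (c : Char) : Int × Int :=
  if c = '>' then (1, 0) else if c = '^' then (0, -1) else if c = 'v' then (0, 1) else (-1, 0)

-- the marker's path: (x,y) followed by the partial sums of the arrow steps of pot
def pvPath (x : Int) (y : Int) (cs : List Char) : List (Int × Int) :=
  ((cs.filter pvArrow).map pvStep).scanl (fun p d => (p.1 + d.1, p.2 + d.2)) (x, y)

-- Pre_ = exactly the inputs on which A returns: every path position indexes the visina×sirina grid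
-- within Python's (negative-wrapping) index range; anywhere else A raises IndexError.
def Pre_animacija0 (x : Int) (y : Int) (pot : String) (sirina : Int) (visina : Int) : Prop :=
  ∀ p ∈ pvPath x y pot.toList, -visina ≤ p.2 ∧ p.2 < visina ∧ -sirina ≤ p.1 ∧ p.1 < sirina
instance (x : Int) (y : Int) (pot : String) (sirina : Int) (visina : Int) : Decidable (Pre_animacija0 x y pot sirina visina) := by unfold Pre_animacija0; infer_instance

def pvWitness_animacija0 : Int × Int × String × Int × Int := (0, 0, ">v", 2, 2)

def Spec_animacija0 (x : Int) (y : Int) (pot : String) (sirina : Int) (visina : Int) (out : List String) : Prop := out = animacija0_alt x y pot sirina visina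
instance (x : Int) (y : Int) (pot : String) (sirina : Int) (visina : Int) (out : List String) : Decidable (Spec_animacija0 x y pot sirina visina out) := by unfold Spec_animacija0; infer_instance

-- ===== CLAIM (what is proved, stated in full; the proofs are below) =====
def Claim_equal_animacija0 : Prop := ∀ (x : Int) (y : Int) (pot : String) (sirina : Int) (visina : Int), Dom_animacija0 x y pot sirina visina → Pre_animacija0 x y pot sirina visina → Spec_animacija0 x y pot sirina visina (animacija0 x y pot sirina visina)

-- ===== LEMMAS AND PROOFS =====

-- Python's normalised index for -n ≤ i < n
def pvNorm (n : Nat) (i : Int) : Nat := if 0 ≤ i then i.toNat else n - (-i).toNat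

-- final (x, y) after walking the arrows of cs
def pvEnd (x : Int) (y : Int) : List Char → Int × Int
  | [] => (x, y)
  | c :: cs => if pvArrow c then pvEnd (x + (pvStep c).1) (y + (pvStep c).2) cs else pvEnd x y cs

-- the frame both programs render for path point with normalised indices (xi, yi)
def pvFrameL (S : Nat) (V : Nat) (xi : Nat) (yi : Nat) : List Char :=
  PySem.Chars.join ['\n'] ((List.replicate V (List.replicate S '.')).set yi ((List.replicate S '.').set xi 'A'))

-- the rendered frame for path point p on the sirina×visina grid
def pvFrame (sirina : Int) (visina : Int) (p : Int × Int) : String :=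
  String.ofList (PySem.Chars.strip (pvFrameL sirina.toNat visina.toNat (pvNorm sirina.toNat p.1) (pvNorm visina.toNat p.2)))

lemma pvNorm_lt (n : Nat) (i : Int) (h1 : -(n : Int) ≤ i) (h2 : i < n) : pvNorm n i < n := by
  unfold pvNorm; split <;> omega

lemma pyIdx_eq (n : Nat) (i : Int) (h1 : -(n : Int) ≤ i) (h2 : i < n) :
    PySem.List.pyIdx? n i = some (pvNorm n i) := by
  unfold PySem.List.pyIdx? pvNorm
  split
  · simp
  · simp

lemma pyGetD_norm {α : Type} (xs : List α) (i : Int) (d : α)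
    (h1 : -(xs.length : Int) ≤ i) (h2 : i < xs.length) :
    PySem.List.pyGetD xs i d = xs.getD (pvNorm xs.length i) d := by
  simp [PySem.List.pyGetD, PySem.List.pyGet?, pyIdx_eq _ _ h1 h2, List.getD]

lemma pySetD_norm {α : Type} (xs : List α) (i : Int) (v : α)
    (h1 : -(xs.length : Int) ≤ i) (h2 : i < xs.length) :
    PySem.List.pySetD xs i v = xs.set (pvNorm xs.length i) v := by
  simp [PySem.List.pySetD, PySem.List.pySet?, pyIdx_eq _ _ h1 h2]

lemma getD_replicate' {α : Type} (n : Nat) (a : α) (i : Nat) (d : α) (h : i < n) :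
    (List.replicate n a).getD i d = a := by
  simp [List.getD, h]

lemma length_pyRange01 (n : Int) : (PySem.List.pyRange 0 n 1).length = n.toNat := by
  simp [PySem.List.pyRange]; omega

lemma emptyGridA_eq (sirina : Int) (visina : Int) :
    emptyGridA sirina visina
      = List.replicate visina.toNat (List.replicate sirina.toNat ([] : PySem.Set (List Char))) := by
  unfold emptyGridA
  rw [PySem.List.foldl_append_singleton_eq_map
        (fun _ => (PySem.List.pyRange 0 sirina 1).foldl
          (fun s1 _k => s1 ++ [(PySem.Set.empty : PySem.Set (List Char))]) [])]
  rw [PySem.List.foldl_append_singleton_eq_map (fun _ => (PySem.Set.empty : PySem.Set (List Char)))]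
  simp [List.map_const']

lemma znakA_nil : znakA ([] : PySem.Set (List Char)) = ['.'] := by decide

lemma znakA_A : znakA ([['A']] : PySem.Set (List Char)) = ['A'] := by decide

lemma rowChars_dot (S : Nat) :
    (List.replicate S ([] : PySem.Set (List Char))).flatMap znakA = List.replicate S '.' := by
  induction S with
  | zero => rfl
  | succ n ih =>
    rw [List.replicate_succ, List.flatMap_cons, znakA_nil, ih, List.replicate_succ]
    rfl

lemma rowChars_mark (S : Nat) (xi : Nat) (hx : xi < S) :
    ((List.replicate S ([] : PySem.Set (List Char))).set xi [['A']]).flatMap znakA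
      = (List.replicate S '.').set xi 'A' := by
  induction S generalizing xi with
  | zero => omega
  | succ n ih =>
    cases xi with
    | zero =>
      rw [List.replicate_succ, List.set_cons_zero, List.flatMap_cons, znakA_A,
        rowChars_dot, List.replicate_succ, List.set_cons_zero]
      rfl
    | succ m =>
      rw [List.replicate_succ, List.set_cons_succ, List.flatMap_cons, znakA_nil,
        ih m (by omega), List.replicate_succ, List.set_cons_succ]
      rfl

lemma izris_fold (g : List (List (PySem.Set (List Char)))) (acc : List Char) :
    g.foldl (fun vse i => (i.foldl (fun v k => v ++ znakA k) vse) ++ ['\n']) acc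
      = acc ++ g.flatMap (fun r => r.flatMap znakA ++ ['\n']) := by
  induction g generalizing acc with
  | nil => simp
  | cons r t ih =>
    rw [List.foldl_cons, PySem.List.foldl_append_eq_flatMap znakA r acc, ih, List.flatMap_cons]
    simp [List.append_assoc]

lemma rstrip_nl (s : List Char) : PySem.Chars.rstrip (s ++ ['\n']) = PySem.Chars.rstrip s := by
  simp [PySem.Chars.rstrip, show PySem.Chars.isspace '\n' = true from by decide]

lemma strip_nl (s : List Char) : PySem.Chars.strip (s ++ ['\n']) = PySem.Chars.strip s := by
  show PySem.Chars.rstrip (PySem.Chars.lstrip (s ++ ['\n'])) = PySem.Chars.rstrip (PySem.Chars.lstrip s)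
  unfold PySem.Chars.lstrip
  rw [List.dropWhile_append]
  split
  · next h =>
    simp only [List.isEmpty_iff] at h
    rw [h]
    simp [List.dropWhile, show PySem.Chars.isspace '\n' = true from by decide, PySem.Chars.rstrip]
  · exact rstrip_nl _

lemma flatMap_nl_join (l : List (List Char)) (h : l ≠ []) :
    l.flatMap (fun r => r ++ ['\n']) = PySem.Chars.join ['\n'] l ++ ['\n'] := by
  induction l with
  | nil => exact absurd rfl h
  | cons a t ih =>
    cases t with
    | nil => simp [PySem.Chars.join_singleton]
    | cons b u =>
      rw [List.flatMap_cons, ih (by simp), PySem.Chars.join_cons_cons]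
      simp

lemma izris_marked (S : Nat) (V : Nat) (xi : Nat) (yi : Nat) (hx : xi < S) (hy : yi < V) :
    izrisA ((List.replicate V (List.replicate S ([] : PySem.Set (List Char)))).set yi
        ((List.replicate S ([] : PySem.Set (List Char))).set xi [['A']]))
      = PySem.Chars.strip (pvFrameL S V xi yi) := by
  unfold izrisA
  rw [izris_fold, List.nil_append]
  rw [show (((List.replicate V (List.replicate S ([] : PySem.Set (List Char)))).set yi
        ((List.replicate S ([] : PySem.Set (List Char))).set xi [['A']])).flatMap
          (fun r => r.flatMap znakA ++ ['\n']))
      = (((List.replicate V (List.replicate S ([] : PySem.Set (List Char)))).set yi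
        ((List.replicate S ([] : PySem.Set (List Char))).set xi [['A']])).map
          (fun r => r.flatMap znakA)).flatMap (fun r => r ++ ['\n']) from (List.flatMap_map (fun r => List.flatMap znakA r) (fun r => r ++ ['\n']) _).symm]
  rw [List.map_set, List.map_replicate, rowChars_dot, rowChars_mark S xi hx]
  rw [flatMap_nl_join _ (by
    intro hnil
    have := congrArg List.length hnil
    simp at this
    omega)]
  rw [strip_nl]
  rfl

-- path shape lemmas
lemma pvPath_cons_tail (x y : Int) (cs : List Char) :
    pvPath x y cs = (x, y) :: (pvPath x y cs).tail := by
  unfold pvPath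
  cases ((cs.filter pvArrow).map pvStep) <;> simp [List.scanl]

lemma pvPath_arrow (x y : Int) (c : Char) (cs : List Char) (h : pvArrow c = true) :
    pvPath x y (c :: cs) = (x, y) :: pvPath (x + (pvStep c).1) (y + (pvStep c).2) cs := by
  unfold pvPath
  simp [h, List.scanl]

lemma pvPath_skip (x y : Int) (c : Char) (cs : List Char) (h : pvArrow c = false) :
    pvPath x y (c :: cs) = pvPath x y cs := by
  unfold pvPath
  simp [h]

lemma korakiBodyA_arrow (st : List (Int × Int) × Int × Int) (c : Char) (h : pvArrow c = true) :
    korakiBodyA st c = (st.1 ++ [(st.2.1 + (pvStep c).1, st.2.2 + (pvStep c).2)],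
      st.2.1 + (pvStep c).1, st.2.2 + (pvStep c).2) := by
  unfold pvArrow at h
  simp only [Bool.or_eq_true, decide_eq_true_eq] at h
  rcases h with ((h | h) | h) | h <;> subst h <;>
    simp [korakiBodyA, pvStep, sub_eq_add_neg]

lemma korakiBodyA_skip (st : List (Int × Int) × Int × Int) (c : Char) (h : pvArrow c = false) :
    korakiBodyA st c = st := by
  unfold pvArrow at h
  simp only [Bool.or_eq_false_iff, decide_eq_false_iff_not] at h
  simp [korakiBodyA, h.1.1.1, h.1.1.2, h.1.2, h.2]

lemma foldKorakiA (cs : List Char) : ∀ (x y : Int) (sez : List (Int × Int)),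
    cs.foldl korakiBodyA (sez, x, y) = (sez ++ (pvPath x y cs).tail, pvEnd x y cs) := by
  induction cs with
  | nil => intro x y sez; simp [pvPath, List.scanl, pvEnd]
  | cons c cs ih =>
    intro x y sez
    by_cases h : pvArrow c
    · rw [List.foldl_cons, korakiBodyA_arrow (sez, x, y) c h]
      rw [ih, pvPath_arrow x y c cs h]
      rw [pvPath_cons_tail (x + (pvStep c).1) (y + (pvStep c).2) cs]
      simp [pvEnd, h]
    · rw [List.foldl_cons, korakiBodyA_skip (sez, x, y) c (by simpa using h)]
      rw [ih, pvPath_skip x y c cs (by simpa using h)]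
      simp [pvEnd, h]

lemma korakiA_eq (x y : Int) (pot : String) : korakiA x y pot = pvPath x y pot.toList := by
  unfold korakiA
  rw [foldKorakiA]
  show [(x, y)] ++ (pvPath x y pot.toList).tail = pvPath x y pot.toList
  rw [List.singleton_append]
  exact (pvPath_cons_tail x y pot.toList).symm

lemma movesB_get (c : Char) :
    PySem.Dict.get? movesB c = if pvArrow c then some (pvStep c) else none := by
  by_cases h1 : c = '>'
  · subst h1; decide
  by_cases h2 : c = '^'
  · subst h2; decide
  by_cases h3 : c = 'v'
  · subst h3; decide
  by_cases h4 : c = '<'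
  · subst h4; decide
  have ha : pvArrow c = false := by simp [pvArrow, h1, h2, h3, h4]
  rw [ha]
  simp [PySem.Dict.get?, movesB, beq_iff_eq, Ne.symm h1, Ne.symm h2, Ne.symm h3, Ne.symm h4]

lemma posBodyB_arrow (st : List (Int × Int) × Int × Int) (c : Char) (h : pvArrow c = true) :
    posBodyB st c = (st.1 ++ [(st.2.1 + (pvStep c).1, st.2.2 + (pvStep c).2)],
      st.2.1 + (pvStep c).1, st.2.2 + (pvStep c).2) := by
  simp [posBodyB, movesB_get, h]

lemma posBodyB_skip (st : List (Int × Int) × Int × Int) (c : Char) (h : pvArrow c = false) :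
    posBodyB st c = st := by
  simp [posBodyB, movesB_get, h]

lemma foldPosB (cs : List Char) : ∀ (x y : Int) (sez : List (Int × Int)),
    cs.foldl posBodyB (sez, x, y) = (sez ++ (pvPath x y cs).tail, pvEnd x y cs) := by
  induction cs with
  | nil => intro x y sez; simp [pvPath, List.scanl, pvEnd]
  | cons c cs ih =>
    intro x y sez
    by_cases h : pvArrow c
    · rw [List.foldl_cons, posBodyB_arrow (sez, x, y) c h]
      rw [ih, pvPath_arrow x y c cs h]
      rw [pvPath_cons_tail (x + (pvStep c).1) (y + (pvStep c).2) cs]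
      simp [pvEnd, h]
    · rw [List.foldl_cons, posBodyB_skip (sez, x, y) c (by simpa using h)]
      rw [ih, pvPath_skip x y c cs (by simpa using h)]
      simp [pvEnd, h]

lemma getD_set_self {α : Type} (l : List α) (i : Nat) (a : α) (d : α) (h : i < l.length) :
    (l.set i a).getD i d = a := by
  simp [List.getD, List.getElem?_set_self h]

-- per-step lemma for A's frame loop
lemma frameBodyA_run (specialci : List (Int × Int)) (sirina visina : Int)
    (hS : 0 < sirina) (hV : 0 < visina) (k : Nat) (vsi : List String) (j : Int)
    (hk : k < specialci.length)
    (hb : -visina ≤ specialci[k].2 ∧ specialci[k].2 < visina ∧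
          -sirina ≤ specialci[k].1 ∧ specialci[k].1 < sirina) :
    frameBodyA specialci sirina visina ((k : Int), vsi) j
      = ((k : Int) + 1, vsi ++ [pvFrame sirina visina specialci[k]]) := by
  obtain ⟨hy1, hy2, hx1, hx2⟩ := hb
  have hVc : ((visina.toNat : Nat) : Int) = visina := Int.toNat_of_nonneg hV.le
  have hSc : ((sirina.toNat : Nat) : Int) = sirina := Int.toNat_of_nonneg hS.le
  have hyiV : pvNorm visina.toNat specialci[k].2 < visina.toNat :=
    pvNorm_lt _ _ (by omega) (by omega)
  have hxiS : pvNorm sirina.toNat specialci[k].1 < sirina.toNat :=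
    pvNorm_lt _ _ (by omega) (by omega)
  simp only [frameBodyA]
  rw [if_pos (by exact_mod_cast hk)]
  have hp : PySem.List.pyGetD specialci ((k : Nat) : Int) (0, 0) = specialci[k] := by
    rw [pyGetD_norm _ _ _ (by omega) (by exact_mod_cast hk)]
    show specialci.getD (pvNorm specialci.length (k : Int)) (0, 0) = specialci[k]
    have : pvNorm specialci.length (k : Int) = k := by unfold pvNorm; simp
    rw [this]
    simp [List.getD, List.getElem?_eq_getElem hk]
  rw [hp, emptyGridA_eq]
  have hrow : PySem.List.pyGetD
      (List.replicate visina.toNat (List.replicate sirina.toNat ([] : PySem.Set (List Char))))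
      specialci[k].2 [] = List.replicate sirina.toNat ([] : PySem.Set (List Char)) := by
    rw [pyGetD_norm _ _ _ (by rw [List.length_replicate]; omega) (by rw [List.length_replicate]; omega),
      List.length_replicate]
    exact getD_replicate' _ _ _ _ hyiV
  rw [hrow]
  have hcell : PySem.List.pyGetD (List.replicate sirina.toNat ([] : PySem.Set (List Char)))
      specialci[k].1 PySem.Set.empty = ([] : PySem.Set (List Char)) := by
    rw [pyGetD_norm _ _ _ (by rw [List.length_replicate]; omega) (by rw [List.length_replicate]; omega),
      List.length_replicate]
    exact getD_replicate' _ _ _ _ hxiS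
  rw [hcell]
  have haddA : PySem.Set.add ([] : PySem.Set (List Char)) ['A'] = [['A']] := by decide
  rw [haddA]
  rw [pySetD_norm _ _ _ (by rw [List.length_replicate]; omega) (by rw [List.length_replicate]; omega),
    List.length_replicate]
  rw [pySetD_norm _ _ _ (by rw [List.length_replicate]; omega) (by rw [List.length_replicate]; omega),
    List.length_replicate]
  rw [izris_marked _ _ _ _ hxiS hyiV]
  rfl

-- per-step lemma for B's frame loop: mark, render, restore
lemma markBodyB_run (sirina visina : Int) (hS : 0 < sirina) (hV : 0 < visina)
    (p : Int × Int) (frames : List String)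
    (hb : -visina ≤ p.2 ∧ p.2 < visina ∧ -sirina ≤ p.1 ∧ p.1 < sirina) :
    markBodyB (List.replicate visina.toNat (List.replicate sirina.toNat '.'), frames) p
      = (List.replicate visina.toNat (List.replicate sirina.toNat '.'),
         frames ++ [pvFrame sirina visina p]) := by
  obtain ⟨hy1, hy2, hx1, hx2⟩ := hb
  have hVc : ((visina.toNat : Nat) : Int) = visina := Int.toNat_of_nonneg hV.le
  have hSc : ((sirina.toNat : Nat) : Int) = sirina := Int.toNat_of_nonneg hS.le
  have hyiV : pvNorm visina.toNat p.2 < visina.toNat := pvNorm_lt _ _ (by omega) (by omega)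
  have hxiS : pvNorm sirina.toNat p.1 < sirina.toNat := pvNorm_lt _ _ (by omega) (by omega)
  simp only [markBodyB]
  have hrow : PySem.List.pyGetD (List.replicate visina.toNat (List.replicate sirina.toNat '.'))
      p.2 [] = List.replicate sirina.toNat '.' := by
    rw [pyGetD_norm _ _ _ (by rw [List.length_replicate]; omega) (by rw [List.length_replicate]; omega),
      List.length_replicate]
    exact getD_replicate' _ _ _ _ hyiV
  rw [hrow]
  rw [pySetD_norm (List.replicate sirina.toNat '.') _ _
        (by rw [List.length_replicate]; omega) (by rw [List.length_replicate]; omega),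
    List.length_replicate]
  rw [pySetD_norm (List.replicate visina.toNat (List.replicate sirina.toNat '.')) _ _
        (by rw [List.length_replicate]; omega) (by rw [List.length_replicate]; omega),
    List.length_replicate]
  have hrow1 : PySem.List.pyGetD
      ((List.replicate visina.toNat (List.replicate sirina.toNat '.')).set
        (pvNorm visina.toNat p.2) ((List.replicate sirina.toNat '.').set (pvNorm sirina.toNat p.1) 'A'))
      p.2 [] = (List.replicate sirina.toNat '.').set (pvNorm sirina.toNat p.1) 'A' := by
    rw [pyGetD_norm _ _ _ (by rw [List.length_set, List.length_replicate]; omega)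
          (by rw [List.length_set, List.length_replicate]; omega),
      List.length_set, List.length_replicate]
    exact getD_set_self _ _ _ _ (by rw [List.length_replicate]; exact hyiV)
  rw [hrow1]
  rw [pySetD_norm ((List.replicate sirina.toNat '.').set (pvNorm sirina.toNat p.1) 'A') _ _
        (by rw [List.length_set, List.length_replicate]; omega)
        (by rw [List.length_set, List.length_replicate]; omega),
    List.length_set, List.length_replicate]
  rw [pySetD_norm _ _ _
        (by rw [List.length_set, List.length_replicate]; omega)
        (by rw [List.length_set, List.length_replicate]; omega),
    List.length_set, List.length_replicate]
  rw [List.set_set, List.set_set, List.set_replicate_self, List.set_replicate_self]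
  rfl

lemma foldA (specialci : List (Int × Int)) (sirina visina : Int)
    (hS : 0 < sirina) (hV : 0 < visina)
    (hb : ∀ p ∈ specialci, -visina ≤ p.2 ∧ p.2 < visina ∧ -sirina ≤ p.1 ∧ p.1 < sirina) :
    ∀ (l : List Int) (k : Nat) (vsi : List String), k + l.length = specialci.length →
    l.foldl (frameBodyA specialci sirina visina) ((k : Int), vsi)
      = ((specialci.length : Int), vsi ++ (specialci.drop k).map (pvFrame sirina visina)) := by
  intro l
  induction l with
  | nil =>
    intro k vsi hlen
    simp at hlen
    subst hlen
    simp
  | cons j l ih =>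
    intro k vsi hlen
    have hk : k < specialci.length := by simp at hlen; omega
    rw [List.foldl_cons, frameBodyA_run specialci sirina visina hS hV k vsi j hk
          (hb _ (List.getElem_mem hk))]
    have hcast : ((k : Int) + 1) = ((k + 1 : Nat) : Int) := by push_cast; ring
    rw [hcast, ih (k + 1) _ (by simp at hlen ⊢; omega)]
    rw [List.drop_eq_getElem_cons hk, List.map_cons]
    simp

lemma foldB (sirina visina : Int) (hS : 0 < sirina) (hV : 0 < visina) :
    ∀ (ps : List (Int × Int)) (frames : List String),
    (∀ p ∈ ps, -visina ≤ p.2 ∧ p.2 < visina ∧ -sirina ≤ p.1 ∧ p.1 < sirina) →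
    ps.foldl markBodyB (List.replicate visina.toNat (List.replicate sirina.toNat '.'), frames)
      = (List.replicate visina.toNat (List.replicate sirina.toNat '.'),
         frames ++ ps.map (pvFrame sirina visina)) := by
  intro ps
  induction ps with
  | nil => intro frames _; simp
  | cons p t ih =>
    intro frames hb
    rw [List.foldl_cons, markBodyB_run sirina visina hS hV p frames (hb p (by simp))]
    rw [ih _ (fun q hq => hb q (by simp [hq]))]
    simp

-- ===== VERDICT (by name: the statement is the Claim_ definition above) =====
theorem animacija0_spec : Claim_equal_animacija0 := by
  intro x y pot sirina visina _hdom hpre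
  unfold Spec_animacija0
  have hxy : (x, y) ∈ pvPath x y pot.toList := by
    rw [pvPath_cons_tail]; exact List.mem_cons_self
  obtain ⟨hy1, hy2, hx1, hx2⟩ := hpre (x, y) hxy
  have hV : 0 < visina := by omega
  have hS : 0 < sirina := by omega
  have hb : ∀ p ∈ pvPath x y pot.toList,
      -visina ≤ p.2 ∧ p.2 < visina ∧ -sirina ≤ p.1 ∧ p.1 < sirina := hpre
  have hA : animacija0 x y pot sirina visina
      = (pvPath x y pot.toList).map (pvFrame sirina visina) := by
    show ((PySem.List.pyRange 0 ((korakiA x y pot).length : Int) 1).foldl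
      (frameBodyA (korakiA x y pot) sirina visina) (0, [])).2 = _
    rw [korakiA_eq]
    have h0 : ((0 : Int), ([] : List String)) = (((0 : Nat) : Int), ([] : List String)) := by simp
    rw [h0, foldA (pvPath x y pot.toList) sirina visina hS hV hb _ 0 []
          (by rw [length_pyRange01]; simp)]
    simp
  have hB : animacija0_alt x y pot sirina visina
      = (pvPath x y pot.toList).map (pvFrame sirina visina) := by
    show (((pot.toList.foldl posBodyB ([(x, y)], x, y)).1).foldl markBodyB
      (List.replicate visina.toNat (List.replicate sirina.toNat '.'), [])).2 = _
    rw [foldPosB]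
    show (((([(x, y)] ++ (pvPath x y pot.toList).tail)).foldl markBodyB
      (List.replicate visina.toNat (List.replicate sirina.toNat '.'), []))).2 = _
    rw [List.singleton_append, ← pvPath_cons_tail, foldB sirina visina hS hV _ [] hb]
    simp
  rw [hA, hB]
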